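-- pv_equiv track=rewrite | github.com/jdhuntington/advent2024 | day01/problem2.py | check_ocurrecurrences
-- ===== SOURCE A (Python) =====
-- def check_ocurrecurrences(l1, l2):
--     result = 0
--     for el in l1:
--         hits = 0
--         for el2 in l2:
--             if el == el2:
--                 hits += 1
--         result += hits * el
--     return result
-- ===== SOURCE B (Python) =====
-- def check_ocurrecurrences(l1, l2):
--     c1 = {}
--     for v in l1:
--         c1[v] = c1.get(v, 0) + 1
--     c2 = {}
--     for v in l2:
--         c2[v] = c2.get(v, 0) + 1
--     result = 0
--     for v, n in c1.items():
--         result += v * n * c2.get(v, 0)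
--     return result
-- ===== Notes on version B (the rewrite author's own statement) =====
-- stated objective: faster
-- what changed: Replaces A's nested scan (for each element of l1, count matches in l2) by building two frequency dictionaries and accumulating v * c1[v] * c2[v] over the distinct keys of c1.
import Mathlib
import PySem

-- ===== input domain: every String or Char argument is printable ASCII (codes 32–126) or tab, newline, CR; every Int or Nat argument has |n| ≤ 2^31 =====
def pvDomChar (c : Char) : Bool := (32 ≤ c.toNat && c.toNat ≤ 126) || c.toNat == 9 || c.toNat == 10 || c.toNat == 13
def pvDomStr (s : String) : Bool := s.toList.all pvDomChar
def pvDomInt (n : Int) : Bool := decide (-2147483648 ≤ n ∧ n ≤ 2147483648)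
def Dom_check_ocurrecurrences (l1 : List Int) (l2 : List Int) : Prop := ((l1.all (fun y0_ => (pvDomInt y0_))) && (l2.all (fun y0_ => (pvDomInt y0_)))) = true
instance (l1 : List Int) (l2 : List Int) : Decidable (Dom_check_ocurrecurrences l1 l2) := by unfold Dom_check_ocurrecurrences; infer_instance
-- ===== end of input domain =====

-- B replaces A's quadratic per-element scan by two frequency dictionaries and one pass
-- over the distinct keys (objective: faster, O(n*m) -> O(n+m) expected).
-- ===== PORT A =====
def check_ocurrecurrences (l1 : List Int) (l2 : List Int) : Int :=
  l1.foldl (fun result el =>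
    result + (l2.foldl (fun hits el2 => if el == el2 then hits + 1 else hits) 0) * el) 0

-- ===== PORT B =====
def check_ocurrecurrences_alt (l1 : List Int) (l2 : List Int) : Int :=
  let c1 := l1.foldl (fun d v => d.insert v (d.getD v 0 + 1)) PySem.Dict.empty
  let c2 := l2.foldl (fun d v => d.insert v (d.getD v 0 + 1)) PySem.Dict.empty
  c1.items.foldl (fun result kv => result + kv.1 * kv.2 * c2.getD kv.1 0) 0

-- ===== PRECONDITION & SPEC =====
def Spec_check_ocurrecurrences (l1 : List Int) (l2 : List Int) (out : Int) : Prop := out = check_ocurrecurrences_alt l1 l2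
instance (l1 : List Int) (l2 : List Int) (out : Int) : Decidable (Spec_check_ocurrecurrences l1 l2 out) := by unfold Spec_check_ocurrecurrences; infer_instance

-- ===== CLAIM (what is proved, stated in full; the proofs are below) =====
def Claim_equal_check_ocurrecurrences : Prop := ∀ (l1 : List Int) (l2 : List Int), Dom_check_ocurrecurrences l1 l2 → Spec_check_ocurrecurrences l1 l2 (check_ocurrecurrences l1 l2)

-- ===== LEMMAS AND PROOFS =====

-- A's inner loop over l2 computes l2.count el (A writes 'el == el2'; count's pattern is 'el2 == el').
theorem pv_inner_count (el : Int) (l2 : List Int) (a : Int) :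
    l2.foldl (fun hits el2 => if el == el2 then hits + 1 else hits) a = a + (l2.count el : Int) := by
  have h : ∀ x : Int, (el == x) = (x == el) := by
    intro x; rw [Bool.eq_iff_iff]; simp only [beq_iff_eq]; exact eq_comm
  simp only [h, PySem.List.foldl_beq_add_one]

-- The two ports agree on every input (the Dom hypothesis is not needed).
theorem check_ocurrecurrences_eq_alt (l1 l2 : List Int) :
    check_ocurrecurrences l1 l2 = check_ocurrecurrences_alt l1 l2 := by
  unfold check_ocurrecurrences check_ocurrecurrences_alt
  simp only [pv_inner_count, zero_add,
    PySem.Dict.foldl_insert_getD_add_one_eq_counter,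
    PySem.Dict.items_counter, PySem.Dict.getD_counter]
  rw [PySem.List.foldl_add (g := fun e => (l2.count e : Int) * e), List.foldl_map]
  simp only [PySem.List.foldl_add, zero_add]
  rw [Finset.sum_list_map_count l1 (fun e => (l2.count e : Int) * e),
      ← List.sum_toFinset _ (PySem.Set.nodup_ofList l1)]
  rw [show (PySem.Set.ofList l1).toFinset = l1.toFinset from by
    ext x; simp [PySem.Set.mem_ofList]]
  apply Finset.sum_congr rfl
  intro x _
  simp
  ring

-- ===== VERDICT (by name: the statement is the Claim_ definition above) =====
theorem check_ocurrecurrences_spec : Claim_equal_check_ocurrecurrences := by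
  intro l1 l2 _
  unfold Spec_check_ocurrecurrences
  exact check_ocurrecurrences_eq_alt l1 l2
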